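-- pv_equiv track=rewrite | github.com/poleha/codility | try6_del.py | initial_move
-- ===== SOURCE A (Python) =====
-- def iterate(a):
--     l = len(a)
--     for j in range(l):
--         for i in range(1, l + 1- j):
--             cur = a[j:j + i]
--             if sum(cur) % 2 == 1:
--                 continue
--             left = a[:j] + a[j + i:]
--             yield (cur, left, i, j)
--
-- def initial_move(a):
--     l = len(a)
--     if l == 1:
--         if a[0] % 2 == 0:
--             return (0, 0)
--         else:
--             return None
--
--     for cur, left, i, j in iterate(a):
--         res = check_left2(left)
--         if res:
--             return (j, j + i - 1)
--
-- def check_left1(a):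
--     # Здесь ход делает первый игрок. То есть нужно, чтобы была хоть одна правильная
--     # То есть крутимся, пока не получим True от второго.
--     # Или если выигрыш в 1 ход, например четный остсток
--     # Есди поражение в 1 ход, товетка неправильноя, False
--     l = len(a)
--     if l == 1:
--         if a[0] % 2 == 0:
--             return True
--         else:
--             return False
--     if sum(a) % 2 == 0:
--         return True
--
--     for cur, left, i, j in iterate(a):
--         res = check_left2(left)
--         if res:
--             return True
--     return False
--
-- def check_left2(a):
--     # Это ход игрока 2. Тут нам нужно, чтобы ни один из его ходов не давал победы.
--     # То есть крутимся, пока не получим False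
--     # Если здесь победа в 1 ход - вернем False, тк ни одной правильной ветки отсюда нет
--     # Если поражение в 1 ход - вернем True
--     l = len(a)
--     if not a:
--         return True
--
--     if l == 1:
--         if a[0] % 2 == 0:
--             return False
--         else:
--             return True
--     if sum(a) % 2 == 0:
--         return False
--
--     for cur, left, i, j in iterate(a):
--         res = check_left1(left)
--         if not res:
--             return False
--     return True
-- ===== SOURCE B (Python) =====
-- def initial_move(a):
--     n = len(a)
--     c = 0
--     for x in a:
--         if x % 2 == 1:
--             c += 1
--     fp = None
--     for k in range(n):
--         if a[k] % 2 == 1: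
--             fp = k
--             break
--     lp = None
--     for k in range(n - 1, -1, -1):
--         if a[k] % 2 == 1:
--             lp = k
--             break
--     cj = 0
--     for j in range(n):
--         s = 0
--         for i in range(1, n + 1 - j):
--             if a[j + i - 1] % 2 == 1:
--                 s += 1
--             if s % 2 == 1:
--                 continue
--             m = n - i
--             if c == s:
--                 if m == 0:
--                     return (j, j + i - 1)
--             elif c - s == 1 and m % 2 == 1:
--                 pos = fp if cj == 1 else lp - i
--                 if pos == (m - 1) // 2:
--                     return (j, j + i - 1)
--         if a[j] % 2 == 1:
--             cj += 1
--     return None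
-- ===== Notes on version B (the rewrite author's own statement) =====
-- stated objective: faster
-- what changed: B replaces A's exponential mutual game-tree recursion (check_left1/check_left2) by a proved closed-form test of the losing positions - the remainder loses exactly when it is empty or has odd length with its single odd element exactly in the middle - evaluated in O(1) per candidate move from one precomputed pass (odd count, first/last odd index, running prefix counts).
import Mathlib
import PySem

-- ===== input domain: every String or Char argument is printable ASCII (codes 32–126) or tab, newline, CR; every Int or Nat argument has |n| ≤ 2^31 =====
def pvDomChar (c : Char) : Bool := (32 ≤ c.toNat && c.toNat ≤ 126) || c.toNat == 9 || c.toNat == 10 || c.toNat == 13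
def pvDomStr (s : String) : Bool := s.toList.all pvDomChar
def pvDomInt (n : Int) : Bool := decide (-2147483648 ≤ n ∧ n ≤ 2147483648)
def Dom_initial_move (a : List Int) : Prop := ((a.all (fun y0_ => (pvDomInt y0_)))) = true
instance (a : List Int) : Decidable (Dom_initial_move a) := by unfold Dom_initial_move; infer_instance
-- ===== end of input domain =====

-- B replaces A's exponential game-tree recursion by a proved closed-form test of the losing
-- positions (empty, or odd length with the single odd element exactly in the middle); measured
-- asymptotically faster in a timing run.


-- ===== PORT A =====
-- Python's generator `iterate(a)`, as the list of all yielded tuples (cur, left, i, j).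
-- range(l) / range(1, l+1-j) are ported as List.range l / List.range' 1 (l-j) (same elements,
-- indices here are in-range Nats); `% 2` on Int is Lean's emod, which agrees with Python's `%`
-- for the positive divisor 2; a[j:j+i] = (a.drop j).take i and a[:j]+a[j+i:] = a.take j ++ a.drop (j+i).
def pyIterate (a : List Int) : List (List Int × List Int × Nat × Nat) :=
  (List.range a.length).flatMap (fun j =>
    (List.range' 1 (a.length - j)).filterMap (fun i =>
      let cur := (a.drop j).take i
      if cur.sum % 2 = 1 then none
      else some (cur, a.take j ++ a.drop (j + i), i, j)))

-- every yielded `left` is strictly shorter than the input (used for termination below)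
theorem pyIterate_left_lt {a : List Int} {t : List Int × List Int × Nat × Nat}
    (h : t ∈ pyIterate a) : t.2.1.length < a.length := by
  simp only [pyIterate, List.mem_flatMap, List.mem_filterMap, List.mem_range, List.mem_range'_1] at h
  obtain ⟨j, hj, i, ⟨hi1, hi2⟩, hsome⟩ := h
  split at hsome
  · exact absurd hsome (by simp)
  · cases hsome
    simp only [List.length_append, List.length_take, List.length_drop]
    omega

mutual
-- port of Python check_left1
def check_left1 (a : List Int) : Bool :=
  if a.length = 1 then decide ((a.headD 0) % 2 = 0)
  else if a.sum % 2 = 0 then true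
  else (pyIterate a).attach.any (fun t => check_left2 t.1.2.1)
termination_by a.length
decreasing_by exact pyIterate_left_lt t.2

-- port of Python check_left2
def check_left2 (a : List Int) : Bool :=
  if a = [] then true
  else if a.length = 1 then decide (¬ (a.headD 0) % 2 = 0)
  else if a.sum % 2 = 0 then false
  else (pyIterate a).attach.all (fun t => check_left1 t.1.2.1)
termination_by a.length
decreasing_by exact pyIterate_left_lt t.2
end

def initial_move (a : List Int) : Option (Int × Int) :=
  if a.length = 1 then
    if (a.headD 0) % 2 = 0 then some (0, 0) else none
  else
    (pyIterate a).findSome? (fun t =>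
      if check_left2 t.2.1 then some ((t.2.2.2 : Int), (t.2.2.2 : Int) + (t.2.2.1 : Int) - 1)
      else none)

-- ===== PORT B =====
-- port of Source B's first scan `for k in range(n): if a[k] % 2 == 1: fp = k; break`
def pvFirstOdd : List Int → Option Nat
  | [] => none
  | x :: t => if x % 2 = 1 then some 0 else (pvFirstOdd t).map (· + 1)

-- port of Source B's backwards scan `for k in range(n - 1, -1, -1): ...` (recursion from the right)
def pvLastOdd : List Int → Option Nat
  | [] => none
  | x :: t =>
    match pvLastOdd t with
    | some p => some (p + 1)
    | none => if x % 2 = 1 then some 0 else none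

-- port of Source B's inner loop `for i in range(1, n + 1 - j)` with the running segment count s;
-- fp/lp are Source B's first/last odd index (only read on branches where Source B has them set)
def pvInner (a : List Int) (n j c cj fp lp : Nat) : List Nat → Nat → Option (Int × Int)
  | [], _ => none
  | i :: rest, s0 =>
    let s := if a.getD (j + i - 1) 0 % 2 = 1 then s0 + 1 else s0
    if s % 2 = 1 then pvInner a n j c cj fp lp rest s
    else if c = s then
      (if n - i = 0 then some ((j : Int), (j : Int) + (i : Int) - 1)
       else pvInner a n j c cj fp lp rest s)
    else if c - s = 1 ∧ (n - i) % 2 = 1 then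
      (if (if cj = 1 then fp else lp - i) = (n - i - 1) / 2 then
        some ((j : Int), (j : Int) + (i : Int) - 1)
       else pvInner a n j c cj fp lp rest s)
    else pvInner a n j c cj fp lp rest s

-- port of Source B's outer loop `for j in range(n)` with the running prefix count cj
def pvOuter (a : List Int) (n c fp lp : Nat) : List Nat → Nat → Option (Int × Int)
  | [], _ => none
  | j :: rest, cj =>
    match pvInner a n j c cj fp lp (List.range' 1 (n - j)) 0 with
    | some r => some r
    | none => pvOuter a n c fp lp rest (if a.getD j 0 % 2 = 1 then cj + 1 else cj)

def initial_move_alt (a : List Int) : Option (Int × Int) :=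
  pvOuter a a.length (a.countP (fun x => decide (x % 2 = 1)))
    ((pvFirstOdd a).getD 0) ((pvLastOdd a).getD 0) (List.range a.length) 0

-- ===== PRECONDITION & SPEC =====
def Spec_initial_move (a : List Int) (out : Option (Int × Int)) : Prop := out = initial_move_alt a
instance (a : List Int) (out : Option (Int × Int)) : Decidable (Spec_initial_move a out) := by unfold Spec_initial_move; infer_instance

-- ===== CLAIM (what is proved, stated in full; the proofs are below) =====
def Claim_equal_initial_move : Prop := ∀ (a : List Int), Dom_initial_move a → Spec_initial_move a (initial_move a)

-- ===== LEMMAS AND PROOFS =====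

-- the closed-form losing-position test that Source B's O(1) move test implements
-- (used only in the proofs below, to state what the arithmetic test computes)
def pvLosing (b : List Int) : Bool :=
  if b = [] then true
  else if b.length % 2 = 0 then false
  else
    decide ((b.getD (b.length / 2) 0) % 2 = 1)
      && (b.take (b.length / 2)).all (fun x => decide (x % 2 = 0))
      && (b.drop (b.length / 2 + 1)).all (fun x => decide (x % 2 = 0))


-- number of odd elements
def cntOdd (l : List Int) : Nat := l.countP (fun x => decide (x % 2 = 1))

theorem cntOdd_nil : cntOdd [] = 0 := rfl
theorem cntOdd_cons (x : Int) (l : List Int) :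
    cntOdd (x :: l) = (if x % 2 = 1 then 1 else 0) + cntOdd l := by
  simp only [cntOdd, List.countP_cons, decide_eq_true_eq]
  split_ifs with h <;> omega
theorem cntOdd_append (l₁ l₂ : List Int) : cntOdd (l₁ ++ l₂) = cntOdd l₁ + cntOdd l₂ := by
  simp [cntOdd, List.countP_append]

theorem cntOdd_eq_zero {l : List Int} (h : ∀ y ∈ l, y % 2 = 0) : cntOdd l = 0 := by
  simp [cntOdd, List.countP_eq_zero]
  intro y hy
  have := h y hy; omega

-- parity of the sum is the parity of the number of odd elements
theorem sum_mod_two (l : List Int) : l.sum % 2 = (cntOdd l : Int) % 2 := by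
  induction l with
  | nil => rfl
  | cons x t ih =>
    rw [List.sum_cons, cntOdd_cons]
    have hx := Int.emod_two_eq x
    have ht := Int.emod_two_eq t.sum
    have h1 := Int.add_mul_emod_self_left (a := x + t.sum) (b := 2)
    split <;> push_cast <;> omega

-- sorried structural lemmas, filled in below
theorem losing_struct (U V : List Int) (x : Int) (hU : ∀ y ∈ U, y % 2 = 0)
    (hx : x % 2 = 1) (hV : ∀ y ∈ V, y % 2 = 0) :
    pvLosing (U ++ x :: V) = decide (U.length = V.length) := by
  have hne : U ++ x :: V ≠ [] := by simp
  have hlen : (U ++ x :: V).length = U.length + V.length + 1 := by simp; omega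
  unfold pvLosing
  rw [if_neg hne, hlen]
  by_cases heq : U.length = V.length
  · rw [if_neg (by omega)]
    have hm : (U.length + V.length + 1) / 2 = U.length := by omega
    rw [hm]
    have hget : (U ++ x :: V).getD U.length 0 = x := by
      rw [List.getD_eq_getElem?_getD, List.getElem?_append_right (le_refl _)]
      simp
    have htake : (U ++ x :: V).take U.length = U := List.take_left
    have hdrop : (U ++ x :: V).drop (U.length + 1) = V := by
      rw [show U ++ x :: V = (U ++ [x]) ++ V by simp, List.drop_left' (by simp)]
    rw [hget, htake, hdrop]
    have h1 : decide (x % 2 = 1) = true := by simp [hx]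
    have h2 : U.all (fun y => decide (y % 2 = 0)) = true := by
      simp only [List.all_eq_true, decide_eq_true_eq]; exact hU
    have h3 : V.all (fun y => decide (y % 2 = 0)) = true := by
      simp only [List.all_eq_true, decide_eq_true_eq]; exact hV
    rw [h1, h2, h3]
    simp [heq]
  · by_cases hpar : (U.length + V.length + 1) % 2 = 0
    · rw [if_pos hpar]; simp [heq]
    · rw [if_neg hpar]
      have hmne : (U.length + V.length + 1) / 2 ≠ U.length := by omega
      have hmlt : (U.length + V.length + 1) / 2 < U.length + V.length + 1 := by omega
      rcases Nat.lt_or_ge ((U.length + V.length + 1) / 2) U.length with hlt | hge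
      · have hget : (U ++ x :: V).getD ((U.length + V.length + 1) / 2) 0
            = U.getD ((U.length + V.length + 1) / 2) 0 := by
          rw [List.getD_eq_getElem?_getD, List.getElem?_append_left hlt,
            ← List.getD_eq_getElem?_getD]
        have hmem : U.getD ((U.length + V.length + 1) / 2) 0 ∈ U := by
          rw [List.getD_eq_getElem?_getD, List.getElem?_eq_getElem hlt]
          exact List.getElem_mem hlt
        have heven := hU _ hmem
        have h1 : decide ((U ++ x :: V).getD ((U.length + V.length + 1) / 2) 0 % 2 = 1) = false := by
          rw [hget]; simp only [decide_eq_false_iff_not]; omega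
        rw [h1]
        simp [heq]
      · have hgt : U.length < (U.length + V.length + 1) / 2 := by omega
        have hidx : (U.length + V.length + 1) / 2 - U.length - 1 < V.length := by omega
        have hget : (U ++ x :: V).getD ((U.length + V.length + 1) / 2) 0
            = V.getD ((U.length + V.length + 1) / 2 - U.length - 1) 0 := by
          rw [List.getD_eq_getElem?_getD, List.getElem?_append_right hge]
          have : (U.length + V.length + 1) / 2 - U.length
              = ((U.length + V.length + 1) / 2 - U.length - 1) + 1 := by omega
          rw [this]
          simp [← List.getD_eq_getElem?_getD]
        have hmem : V.getD ((U.length + V.length + 1) / 2 - U.length - 1) 0 ∈ V := by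
          rw [List.getD_eq_getElem?_getD, List.getElem?_eq_getElem hidx]
          exact List.getElem_mem hidx
        have heven := hV _ hmem
        have h1 : decide ((U ++ x :: V).getD ((U.length + V.length + 1) / 2) 0 % 2 = 1) = false := by
          rw [hget]; simp only [decide_eq_false_iff_not]; omega
        rw [h1]
        simp [heq]

theorem losing_true_elim {b : List Int} (h : pvLosing b = true) :
    b = [] ∨ ∃ U x V, b = U ++ x :: V ∧ (∀ y ∈ U, y % 2 = 0) ∧ x % 2 = 1 ∧
      (∀ y ∈ V, y % 2 = 0) ∧ U.length = V.length := by
  by_cases hb : b = []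
  · exact Or.inl hb
  · right
    unfold pvLosing at h
    rw [if_neg hb] at h
    by_cases hpar : b.length % 2 = 0
    · rw [if_pos hpar] at h; exact absurd h (by simp)
    · rw [if_neg hpar] at h
      simp only [Bool.and_eq_true, decide_eq_true_eq, List.all_eq_true] at h
      obtain ⟨⟨hx, hU⟩, hV⟩ := h
      have hnpos : 0 < b.length := List.length_pos_of_ne_nil hb
      have hmlt : b.length / 2 < b.length := by omega
      refine ⟨b.take (b.length / 2), b.getD (b.length / 2) 0, b.drop (b.length / 2 + 1),
        ?_, ?_, hx, ?_, ?_⟩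
      · nth_rewrite 1 [← List.take_append_drop (b.length / 2) b]
        congr 1
        rw [List.drop_eq_getElem_cons hmlt]
        congr 1
        rw [List.getD_eq_getElem?_getD, List.getElem?_eq_getElem hmlt]
        rfl
      · intro y hy; exact hU y hy
      · intro y hy; exact hV y hy
      · simp only [List.length_take, List.length_drop]
        omega

theorem cntOdd_zero_even {l : List Int} (h : cntOdd l = 0) : ∀ y ∈ l, y % 2 = 0 := by
  simp only [cntOdd, List.countP_eq_zero, decide_eq_true_eq] at h
  intro y hy
  have h1 := h y hy
  have h2 := Int.emod_two_eq y
  omega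

theorem first_odd_split {b : List Int} (h : cntOdd b ≠ 0) :
    ∃ u x v, b = u ++ x :: v ∧ (∀ y ∈ u, y % 2 = 0) ∧ x % 2 = 1 := by
  induction b with
  | nil => exact absurd rfl h
  | cons x t ih =>
    by_cases hx : x % 2 = 1
    · exact ⟨[], x, t, rfl, by simp, hx⟩
    · have hx0 : x % 2 = 0 := by have := Int.emod_two_eq x; omega
      have ht : cntOdd t ≠ 0 := by rw [cntOdd_cons, if_neg hx] at h; simpa using h
      obtain ⟨u, y, v, heq, hu, hy⟩ := ih ht
      refine ⟨x :: u, y, v, by rw [heq]; rfl, ?_, hy⟩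
      intro z hz
      rcases List.mem_cons.1 hz with h1 | h1
      · rw [h1]; exact hx0
      · exact hu z h1

theorem last_odd_split {b : List Int} (h : cntOdd b ≠ 0) :
    ∃ u x v, b = u ++ x :: v ∧ x % 2 = 1 ∧ (∀ y ∈ v, y % 2 = 0) := by
  induction b with
  | nil => exact absurd rfl h
  | cons x t ih =>
    by_cases ht : cntOdd t = 0
    · have hx : x % 2 = 1 := by
        by_contra hx
        rw [cntOdd_cons, if_neg hx, ht] at h
        exact h rfl
      exact ⟨[], x, t, rfl, hx, cntOdd_zero_even ht⟩
    · obtain ⟨u, y, v, heq, hy, hv⟩ := ih ht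
      exact ⟨x :: u, y, v, by rw [heq]; rfl, hy, hv⟩

theorem first_odd_unique {u₁ u₂ v₁ v₂ : List Int} {x₁ x₂ : Int}
    (h : u₁ ++ x₁ :: v₁ = u₂ ++ x₂ :: v₂)
    (hu₁ : ∀ y ∈ u₁, y % 2 = 0) (hu₂ : ∀ y ∈ u₂, y % 2 = 0)
    (hx₁ : x₁ % 2 = 1) (hx₂ : x₂ % 2 = 1) : u₁ = u₂ ∧ x₁ = x₂ ∧ v₁ = v₂ := by
  induction u₁ generalizing u₂ with
  | nil =>
    cases u₂ with
    | nil => simpa using h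
    | cons z t =>
      simp only [List.nil_append, List.cons_append, List.cons.injEq] at h
      have := hu₂ z (by simp)
      omega
  | cons z t iht =>
    cases u₂ with
    | nil =>
      simp only [List.nil_append, List.cons_append, List.cons.injEq] at h
      have := hu₁ z (by simp)
      omega
    | cons z₂ t₂ =>
      simp only [List.cons_append, List.cons.injEq] at h
      obtain ⟨hz, hrest⟩ := h
      obtain ⟨e1, e2, e3⟩ := iht hrest (fun y hy => hu₁ y (by simp [hy]))
        (fun y hy => hu₂ y (by simp [hy]))
      exact ⟨by rw [hz, e1], e2, e3⟩

theorem last_odd_unique {u₁ u₂ v₁ v₂ : List Int} {x₁ x₂ : Int}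
    (h : u₁ ++ x₁ :: v₁ = u₂ ++ x₂ :: v₂)
    (hv₁ : ∀ y ∈ v₁, y % 2 = 0) (hv₂ : ∀ y ∈ v₂, y % 2 = 0)
    (hx₁ : x₁ % 2 = 1) (hx₂ : x₂ % 2 = 1) : u₁ = u₂ ∧ x₁ = x₂ ∧ v₁ = v₂ := by
  have h' : v₁.reverse ++ x₁ :: u₁.reverse = v₂.reverse ++ x₂ :: u₂.reverse := by
    have := congrArg List.reverse h
    simpa [List.reverse_append] using this
  obtain ⟨e1, e2, e3⟩ := first_odd_unique h'
    (fun y hy => hv₁ y (List.mem_reverse.1 hy))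
    (fun y hy => hv₂ y (List.mem_reverse.1 hy)) hx₁ hx₂
  refine ⟨?_, e2, ?_⟩
  · have := congrArg List.reverse e3; simpa using this
  · have := congrArg List.reverse e1; simpa using this

theorem mem_pyIterate {b L S R : List Int} (hb : b = L ++ S ++ R) (hS : S ≠ [])
    (hsum : ¬ S.sum % 2 = 1) : (S, L ++ R, S.length, L.length) ∈ pyIterate b := by
  have hlen : b.length = L.length + S.length + R.length := by simp [hb]; omega
  have hSpos : 0 < S.length := List.length_pos_of_ne_nil hS
  have hdropL : b.drop L.length = S ++ R := by
    rw [hb, List.append_assoc, List.drop_left]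
  have hcur : (b.drop L.length).take S.length = S := by rw [hdropL, List.take_left]
  have htakeL : b.take L.length = L := by
    rw [hb, List.append_assoc, List.take_left]
  have hdropR : b.drop (L.length + S.length) = R := by
    rw [hb, List.append_assoc, ← List.length_append (as := L) (bs := S), ← List.append_assoc,
      List.drop_left]
  simp only [pyIterate, List.mem_flatMap, List.mem_filterMap, List.mem_range, List.mem_range'_1]
  refine ⟨L.length, by omega, S.length, ⟨by omega, by omega⟩, ?_⟩
  rw [hcur]
  simp only [if_neg hsum, htakeL, hdropR]

theorem pyIterate_shape {b : List Int} {t : List Int × List Int × Nat × Nat}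
    (h : t ∈ pyIterate b) : ∃ L S R, b = L ++ S ++ R ∧ S ≠ [] ∧ ¬ S.sum % 2 = 1 ∧
      t = (S, L ++ R, S.length, L.length) := by
  simp only [pyIterate, List.mem_flatMap, List.mem_filterMap, List.mem_range,
    List.mem_range'_1] at h
  obtain ⟨j, hj, i, ⟨hi1, hi2⟩, hsome⟩ := h
  split at hsome
  · exact absurd hsome (by simp)
  · rename_i hsum
    cases hsome
    refine ⟨b.take j, (b.drop j).take i, b.drop (j + i), ?_, ?_, hsum, ?_⟩
    · rw [List.append_assoc]
      nth_rewrite 1 [← List.take_append_drop j b]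
      congr 1
      rw [← List.drop_drop]
      exact (List.take_append_drop i (b.drop j)).symm
    · have : ((b.drop j).take i).length = i := by
        simp only [List.length_take, List.length_drop]; omega
      intro hnil
      rw [hnil] at this; simp at this; omega
    · have h1 : ((b.drop j).take i).length = i := by
        simp only [List.length_take, List.length_drop]; omega
      have h2 : (b.take j).length = j := by
        simp only [List.length_take]; omega
      rw [h1, h2]

-- direction →: from a losing position, every move leaves a non-losing position
theorem cntOdd_even_of_sum {S : List Int} (h : ¬ S.sum % 2 = 1) : cntOdd S % 2 = 0 := by
  have h1 := sum_mod_two S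
  have h2 := Int.emod_two_eq S.sum
  omega

theorem losing_all_moves {b : List Int} (hlen : 2 ≤ b.length) (hL : pvLosing b = true) :
    ∀ t ∈ pyIterate b, pvLosing t.2.1 = false := by
  rcases losing_true_elim hL with hnil | ⟨U, x, V, hb, hU, hx, hV, hk⟩
  · rw [hnil] at hlen; simp at hlen
  intro t ht
  obtain ⟨L, S, R, hb2, hS, hsum, hteq⟩ := pyIterate_shape ht
  have hScnt : cntOdd S = 0 := by
    have h1 := cntOdd_even_of_sum hsum
    have h2 : cntOdd b = 1 := by
      rw [hb, cntOdd_append, cntOdd_cons, if_pos hx, cntOdd_eq_zero hU, cntOdd_eq_zero hV]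
    have h3 : cntOdd b = cntOdd L + cntOdd S + cntOdd R := by
      rw [hb2, cntOdd_append, cntOdd_append]
    omega
  have hSlen : 1 ≤ S.length := List.length_pos_of_ne_nil hS
  have hLR : cntOdd L + cntOdd R = 1 := by
    have h2 : cntOdd b = 1 := by
      rw [hb, cntOdd_append, cntOdd_cons, if_pos hx, cntOdd_eq_zero hU, cntOdd_eq_zero hV]
    have h3 : cntOdd b = cntOdd L + cntOdd S + cntOdd R := by
      rw [hb2, cntOdd_append, cntOdd_append]
    omega
  rw [hteq]
  by_cases hLc : cntOdd L = 1
  · have hRc : cntOdd R = 0 := by omega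
    obtain ⟨u₁, x₁, v₁, hLsplit, hu₁, hx₁⟩ := first_odd_split (by omega : cntOdd L ≠ 0)
    have hv₁ : cntOdd v₁ = 0 := by
      have := hLsplit ▸ hLc
      rw [cntOdd_append, cntOdd_cons, if_pos hx₁] at this
      omega
    have hbig : u₁ ++ x₁ :: (v₁ ++ (S ++ R)) = U ++ x :: V := by
      rw [← hb, hb2, hLsplit]
      simp [List.append_assoc]
    obtain ⟨e1, _, e3⟩ := first_odd_unique hbig hu₁ hU hx₁ hx
    have hlen3 : v₁.length + (S.length + R.length) = V.length := by
      have := congrArg List.length e3; simpa using this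
    have hleft : L ++ R = u₁ ++ x₁ :: (v₁ ++ R) := by rw [hLsplit]; simp
    rw [hleft, losing_struct u₁ (v₁ ++ R) x₁ hu₁ hx₁ ?_]
    · simp only [List.length_append, decide_eq_false_iff_not]
      have : u₁.length = U.length := by rw [e1]
      omega
    · intro y hy
      rcases List.mem_append.1 hy with h1 | h1
      · exact cntOdd_zero_even hv₁ y h1
      · exact cntOdd_zero_even hRc y h1
  · have hLc0 : cntOdd L = 0 := by omega
    have hRc : cntOdd R = 1 := by omega
    obtain ⟨u₂, x₂, v₂, hRsplit, hx₂, hv₂⟩ := last_odd_split (by omega : cntOdd R ≠ 0)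
    have hu₂ : cntOdd u₂ = 0 := by
      have := hRsplit ▸ hRc
      rw [cntOdd_append, cntOdd_cons, if_pos hx₂] at this
      omega
    have hbig : (L ++ (S ++ u₂)) ++ x₂ :: v₂ = U ++ x :: V := by
      rw [← hb, hb2, hRsplit]
      simp [List.append_assoc]
    obtain ⟨e1, _, e3⟩ := last_odd_unique hbig hv₂ hV hx₂ hx
    have hlen3 : L.length + (S.length + u₂.length) = U.length := by
      have := congrArg List.length e1; simpa using this
    have hleft : L ++ R = (L ++ u₂) ++ x₂ :: v₂ := by rw [hRsplit]; simp
    rw [hleft, losing_struct (L ++ u₂) v₂ x₂ ?_ hx₂ hv₂]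
    · simp only [List.length_append, decide_eq_false_iff_not]
      have h4 : v₂.length = V.length := by rw [e3]
      omega
    · intro y hy
      rcases List.mem_append.1 hy with h1 | h1
      · exact cntOdd_zero_even hLc0 y h1
      · exact cntOdd_zero_even hu₂ y h1

theorem cntOdd_cons_odd {x : Int} (l : List Int) (h : x % 2 = 1) :
    cntOdd (x :: l) = 1 + cntOdd l := by rw [cntOdd_cons, if_pos h]

theorem sum_not_odd {S : List Int} (h : cntOdd S % 2 = 0) : ¬ S.sum % 2 = 1 := by
  have h1 := sum_mod_two S
  omega

-- direction ←: from a non-losing position with odd sum, some move leaves a losing position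
theorem not_losing_exists_move {b : List Int} (_hlen : 2 ≤ b.length)
    (hsum : b.sum % 2 = 1) (hL : pvLosing b = false) :
    ∃ t ∈ pyIterate b, pvLosing t.2.1 = true := by
  have hcnt : cntOdd b % 2 = 1 := by have := sum_mod_two b; omega
  obtain ⟨u, x, r, hD0, hu, hx⟩ := first_odd_split (b := b) (by omega)
  have hrc : cntOdd b = 1 + cntOdd r := by
    rw [hD0, cntOdd_append, cntOdd_cons, if_pos hx, cntOdd_eq_zero hu]
    omega
  by_cases hr0 : cntOdd r = 0
  · -- exactly one odd element; recenter it by trimming the longer even side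
    have hvr := cntOdd_zero_even hr0
    have hne : ¬ u.length = r.length := by
      rw [hD0, losing_struct u r x hu hx hvr] at hL
      simpa using hL
    rcases Nat.lt_or_ge u.length r.length with hlt | hge
    · -- drop trailing evens: segment r.drop u.length at position u.length + 1
      have hb : b = (u ++ x :: r.take u.length) ++ (r.drop u.length) ++ [] := by
        rw [hD0]; simp
      have hS : r.drop u.length ≠ [] := by
        intro h; have := congrArg List.length h
        simp only [List.length_drop, List.length_nil] at this; omega
      have hsum2 : ¬ (r.drop u.length).sum % 2 = 1 :=
        sum_not_odd (by rw [cntOdd_eq_zero (fun y hy => hvr y (List.mem_of_mem_drop hy))])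
      refine ⟨_, mem_pyIterate hb hS hsum2, ?_⟩
      show pvLosing ((u ++ x :: r.take u.length) ++ []) = true
      rw [List.append_nil, losing_struct u (r.take u.length) x hu hx
        (fun y hy => hvr y (List.mem_of_mem_take hy))]
      simp only [List.length_take, decide_eq_true_eq]
      omega
    · -- drop leading evens: segment u.take (u.length - r.length) at position 0
      have hdpos : 0 < u.length - r.length := by omega
      have hb : b = [] ++ (u.take (u.length - r.length)) ++
          (u.drop (u.length - r.length) ++ x :: r) := by
        rw [hD0]; simp only [List.nil_append]
        rw [← List.append_assoc, List.take_append_drop]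
      have hS : u.take (u.length - r.length) ≠ [] := by
        intro h; have := congrArg List.length h
        simp only [List.length_take, List.length_nil] at this; omega
      have hsum2 : ¬ (u.take (u.length - r.length)).sum % 2 = 1 :=
        sum_not_odd (by rw [cntOdd_eq_zero (fun y hy => hu y (List.mem_of_mem_take hy))])
      refine ⟨_, mem_pyIterate hb hS hsum2, ?_⟩
      show pvLosing ([] ++ (u.drop (u.length - r.length) ++ x :: r)) = true
      rw [List.nil_append, losing_struct (u.drop (u.length - r.length)) r x
        (fun y hy => hu y (List.mem_of_mem_drop hy)) hx hvr]
      simp only [List.length_drop, decide_eq_true_eq]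
      omega
  · -- at least three odds
    obtain ⟨m1, x2, r2, hr2, hm1, hx2⟩ := first_odd_split (b := r) hr0
    have hr2c : cntOdd r = 1 + cntOdd r2 := by
      rw [hr2, cntOdd_append, cntOdd_cons, if_pos hx2, cntOdd_eq_zero hm1]
      omega
    have hr2ne : cntOdd r2 ≠ 0 := by omega
    obtain ⟨m2, z, v, hr3, hz, hv⟩ := last_odd_split hr2ne
    have hm2c : cntOdd r2 = cntOdd m2 + 1 := by
      rw [hr3, cntOdd_append, cntOdd_cons, if_pos hz, cntOdd_eq_zero hv]
    have hD : b = u ++ x :: m1 ++ x2 :: m2 ++ z :: v := by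
      rw [hD0, hr2, hr3]; simp
    by_cases hf1 : u.length ≤ m1.length + v.length
    · -- keep the FIRST odd: remove a segment from inside m1 through inside v
      rcases Nat.lt_or_ge u.length (m1.length + 1) with hc1 | hc1
      · -- enough evens right of x: trim m1 alone, keep all of v? no: drop everything after
        -- c = m1.take u.length, segment = m1.drop u.length ++ x2 :: m2 ++ z :: v, R = []
        have hb : b = (u ++ x :: m1.take u.length) ++
            (m1.drop u.length ++ x2 :: m2 ++ z :: v) ++ [] := by
          rw [hD]; simp
          rw [← List.append_assoc, List.take_append_drop]
        have hS : m1.drop u.length ++ x2 :: m2 ++ z :: v ≠ [] := by simp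
        have hsum2 : ¬ (m1.drop u.length ++ x2 :: m2 ++ z :: v).sum % 2 = 1 := by
          apply sum_not_odd
          simp only [cntOdd_append, cntOdd_cons_odd _ hx2, cntOdd_cons_odd _ hz,
            cntOdd_eq_zero (fun y hy => hm1 y (List.mem_of_mem_drop hy)), cntOdd_eq_zero hv]
          omega
        refine ⟨_, mem_pyIterate hb hS hsum2, ?_⟩
        show pvLosing ((u ++ x :: m1.take u.length) ++ []) = true
        rw [List.append_nil, losing_struct u (m1.take u.length) x hu hx
          (fun y hy => hm1 y (List.mem_of_mem_take hy))]
        simp only [List.length_take, decide_eq_true_eq]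
        omega
      · -- keep all of m1, also keep a suffix of v of length u.length - m1.length
        have hwlen : u.length - m1.length ≤ v.length := by omega
        have hb : b = (u ++ x :: m1) ++
            (x2 :: m2 ++ z :: v.take (v.length - (u.length - m1.length))) ++
            (v.drop (v.length - (u.length - m1.length))) := by
          rw [hD]
          simp only [List.cons_append, List.append_assoc]
          rw [List.take_append_drop]
        have hS : (x2 :: m2 ++ z :: v.take (v.length - (u.length - m1.length))) ≠ [] := by simp
        have hsum2 : ¬ (x2 :: m2 ++ z :: v.take (v.length - (u.length - m1.length))).sum % 2 = 1 := by
          apply sum_not_odd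
          simp only [cntOdd_append, cntOdd_cons_odd _ hx2, cntOdd_cons_odd _ hz,
            cntOdd_eq_zero (fun y hy => hv y (List.mem_of_mem_take hy))]
          omega
        refine ⟨_, mem_pyIterate hb hS hsum2, ?_⟩
        show pvLosing ((u ++ x :: m1) ++ v.drop (v.length - (u.length - m1.length))) = true
        have hre : (u ++ x :: m1) ++ v.drop (v.length - (u.length - m1.length))
            = u ++ x :: (m1 ++ v.drop (v.length - (u.length - m1.length))) := by simp
        rw [hre, losing_struct u (m1 ++ v.drop (v.length - (u.length - m1.length))) x hu hx ?_]
        · simp only [List.length_append, List.length_drop, decide_eq_true_eq]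
          omega
        · intro y hy
          rcases List.mem_append.1 hy with h1 | h1
          · exact hm1 y h1
          · exact hv y (List.mem_of_mem_drop h1)
    · -- keep the LAST odd; here u.length > m1.length + v.length, so v.length < u.length
      -- re-split everything before the last odd at its own last odd
      have hvu : v.length < u.length := by omega
      have hpc : cntOdd (u ++ x :: m1 ++ x2 :: m2) ≠ 0 := by
        rw [cntOdd_append, cntOdd_append, cntOdd_cons, cntOdd_cons, if_pos hx]
        omega
      obtain ⟨p1, y, w2, hp1, hy, hw2⟩ := last_odd_split hpc
      -- the first odd of p := u ++ x :: (m1 ++ x2 :: m2) is x; recover p = u ++ x :: (p₃ ++ y :: w2)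
      have hyne : cntOdd p1 ≠ 0 := by
        have h1 : cntOdd (u ++ x :: m1 ++ x2 :: m2) = cntOdd p1 + 1 := by
          rw [hp1, cntOdd_append, cntOdd_cons, if_pos hy, cntOdd_eq_zero hw2]
        have h2 : cntOdd (u ++ x :: m1 ++ x2 :: m2) =
            1 + (cntOdd m1 + (1 + cntOdd m2)) := by
          rw [cntOdd_append, cntOdd_append, cntOdd_cons, cntOdd_cons, if_pos hx, if_pos hx2,
            cntOdd_eq_zero hu]
          omega
        omega
      obtain ⟨u₃, x₃, p₃, hp3, hu₃, hx₃⟩ := first_odd_split hyne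
      have hbig : u₃ ++ x₃ :: (p₃ ++ y :: w2) = u ++ x :: (m1 ++ x2 :: m2) := by
        have h := hp1
        rw [hp3] at h
        simp only [List.cons_append, List.append_assoc] at h
        simpa [List.cons_append, List.append_assoc] using h.symm
      obtain ⟨e1, e2, e3⟩ := first_odd_unique hbig hu₃ hu hx₃ hx
      have hDp : b = u ++ x :: p₃ ++ y :: w2 ++ z :: v := by
        have : u ++ x :: (m1 ++ x2 :: m2) ++ z :: v = b := by rw [hD]; simp
        rw [← this, ← hbig, e1, e2]; simp
      have hp3c : cntOdd p₃ % 2 = 0 := by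
        have h1 : cntOdd b = cntOdd u + (1 + (cntOdd p₃ + (1 + (cntOdd w2 + (1 + cntOdd v))))) := by
          rw [hDp, cntOdd_append, cntOdd_append, cntOdd_append, cntOdd_cons, cntOdd_cons,
            cntOdd_cons, if_pos hx, if_pos hy, if_pos hz]
          ring
        rw [cntOdd_eq_zero hu, cntOdd_eq_zero hw2, cntOdd_eq_zero hv] at h1
        omega
      rcases Nat.lt_or_ge v.length (w2.length + 1) with hc1 | hc1
      · -- trim w2 alone: segment = u ++ x :: p₃ ++ y :: w2.take (w2.length - v.length), L = []
        have hb : b = [] ++ (u ++ x :: p₃ ++ y :: w2.take (w2.length - v.length)) ++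
            (w2.drop (w2.length - v.length) ++ z :: v) := by
          rw [hDp]
          simp only [List.nil_append, List.cons_append, List.append_assoc]
          rw [← List.append_assoc (as := List.take (w2.length - v.length) w2),
            List.take_append_drop]
        have hS : (u ++ x :: p₃ ++ y :: w2.take (w2.length - v.length)) ≠ [] := by simp
        have hsum2 : ¬ (u ++ x :: p₃ ++ y :: w2.take (w2.length - v.length)).sum % 2 = 1 := by
          apply sum_not_odd
          simp only [cntOdd_append, cntOdd_cons_odd _ hx, cntOdd_cons_odd _ hy,
            cntOdd_eq_zero hu, cntOdd_eq_zero (fun y' hy' => hw2 y' (List.mem_of_mem_take hy'))]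
          omega
        refine ⟨_, mem_pyIterate hb hS hsum2, ?_⟩
        show pvLosing ([] ++ (w2.drop (w2.length - v.length) ++ z :: v)) = true
        rw [List.nil_append, losing_struct (w2.drop (w2.length - v.length)) v z
          (fun y' hy' => hw2 y' (List.mem_of_mem_drop hy')) hz hv]
        simp only [List.length_drop, decide_eq_true_eq]
        omega
      · -- keep all of w2 and a prefix of u of length v.length - w2.length
        have hklen : v.length - w2.length ≤ u.length := by omega
        have hb : b = (u.take (v.length - w2.length)) ++
            (u.drop (v.length - w2.length) ++ x :: p₃ ++ [y]) ++ (w2 ++ z :: v) := by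
          rw [hDp]
          simp only [List.cons_append, List.append_assoc, List.nil_append]
          rw [← List.append_assoc (as := List.take (v.length - w2.length) u),
            List.take_append_drop]
        have hS : (u.drop (v.length - w2.length) ++ x :: p₃ ++ [y]) ≠ [] := by simp
        have hsum2 : ¬ (u.drop (v.length - w2.length) ++ x :: p₃ ++ [y]).sum % 2 = 1 := by
          apply sum_not_odd
          simp only [cntOdd_append, cntOdd_cons_odd _ hx, cntOdd_cons_odd _ hy,
            cntOdd_eq_zero (fun y' hy' => hu y' (List.mem_of_mem_drop hy')), cntOdd_nil]
          omega
        refine ⟨_, mem_pyIterate hb hS hsum2, ?_⟩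
        show pvLosing ((u.take (v.length - w2.length)) ++ (w2 ++ z :: v)) = true
        have hre : (u.take (v.length - w2.length)) ++ (w2 ++ z :: v)
            = (u.take (v.length - w2.length) ++ w2) ++ z :: v := by simp
        rw [hre, losing_struct (u.take (v.length - w2.length) ++ w2) v z ?_ hz hv]
        · simp only [List.length_append, List.length_take, decide_eq_true_eq]
          omega
        · intro y' hy'
          rcases List.mem_append.1 hy' with h1 | h1
          · exact hu y' (List.mem_of_mem_take h1)
          · exact hw2 y' h1

theorem losing_sum_odd {b : List Int} (h : pvLosing b = true) (hne : b ≠ []) :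
    b.sum % 2 = 1 := by
  rcases losing_true_elim h with h0 | ⟨U, x, V, hb, hU, hx, hV, _⟩
  · exact absurd h0 hne
  · rw [hb, sum_mod_two, cntOdd_append, cntOdd_cons, if_pos hx, cntOdd_eq_zero hU,
      cntOdd_eq_zero hV]
    rfl

-- the main bridge: A's recursions compute the closed form (strong induction on the length)
theorem check_eq_aux (n : Nat) : ∀ b : List Int, b.length ≤ n →
    check_left2 b = pvLosing b ∧ (b ≠ [] → check_left1 b = !pvLosing b) := by
  induction n with
  | zero =>
    intro b hb
    have hb0 : b = [] := List.length_eq_zero_iff.1 (by omega)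
    subst hb0
    refine ⟨?_, fun h => absurd rfl h⟩
    rw [check_left2]
    simp [pvLosing]
  | succ n ih =>
    intro b hb
    by_cases hbe : b = []
    · subst hbe
      refine ⟨?_, fun h => absurd rfl h⟩
      rw [check_left2]
      simp [pvLosing]
    by_cases hb1 : b.length = 1
    · obtain ⟨x, rfl⟩ := List.length_eq_one_iff.1 hb1
      constructor
      · rw [check_left2]
        rcases Int.emod_two_eq x with h | h <;> simp [pvLosing, h]
      · intro _
        rw [check_left1]
        rcases Int.emod_two_eq x with h | h <;> simp [pvLosing, h]
    have hlen2 : 2 ≤ b.length := by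
      have := List.length_pos_of_ne_nil hbe
      omega
    by_cases hbs : b.sum % 2 = 0
    · have hPL : pvLosing b = false := by
        cases h : pvLosing b
        · rfl
        · have := losing_sum_odd h hbe
          omega
      constructor
      · rw [check_left2]
        simp [hbe, hb1, hbs, hPL]
      · intro _
        rw [check_left1]
        simp [hb1, hbs, hPL]
    · have hbs1 : b.sum % 2 = 1 := by have := Int.emod_two_eq b.sum; omega
      have hIH : ∀ t ∈ pyIterate b, check_left2 t.2.1 = pvLosing t.2.1 ∧
          (t.2.1 ≠ [] → check_left1 t.2.1 = !pvLosing t.2.1) :=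
        fun t ht => ih t.2.1 (by have := pyIterate_left_lt ht; omega)
      have hne2 : ∀ t ∈ pyIterate b, t.2.1 ≠ [] := by
        intro t ht h0
        obtain ⟨L, S, R, hb2, hS, hsum3, hteq⟩ := pyIterate_shape ht
        rw [hteq] at h0
        simp only [List.append_eq_nil_iff] at h0
        obtain ⟨hL0, hR0⟩ := h0
        rw [hb2, hL0, hR0] at hbs1
        simp only [List.nil_append, List.append_nil] at hbs1
        exact hsum3 hbs1
      cases hPL : pvLosing b
      · obtain ⟨t, ht, hwin⟩ := not_losing_exists_move hlen2 hbs1 hPL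
        constructor
        · rw [check_left2]
          simp only [if_neg hbe, if_neg hb1, if_neg hbs]
          have hf : check_left1 t.2.1 = false := by
            rw [(hIH t ht).2 (hne2 t ht), hwin]
            rfl
          cases hall : (pyIterate b).attach.all (fun s => check_left1 s.1.2.1)
          · rfl
          · rw [List.all_eq_true] at hall
            have h2 := hall ⟨t, ht⟩ (List.mem_attach _ _)
            rw [hf] at h2
            cases h2
        · intro _
          rw [check_left1]
          simp only [if_neg hb1, if_neg hbs, Bool.not_false]
          rw [List.any_eq_true]
          refine ⟨⟨t, ht⟩, List.mem_attach _ _, ?_⟩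
          show check_left2 t.2.1 = true
          rw [(hIH t ht).1, hwin]
      · have hall := losing_all_moves hlen2 hPL
        constructor
        · rw [check_left2]
          simp only [if_neg hbe, if_neg hb1, if_neg hbs]
          rw [List.all_eq_true]
          rintro ⟨t, ht⟩ -
          show check_left1 t.2.1 = true
          rw [(hIH t ht).2 (hne2 t ht), hall t ht]
          rfl
        · intro _
          rw [check_left1]
          simp only [if_neg hb1, if_neg hbs, Bool.not_true]
          cases hany : (pyIterate b).attach.any (fun s => check_left2 s.1.2.1)
          · rfl
          · rw [List.any_eq_true] at hany
            obtain ⟨⟨t, ht⟩, -, hf⟩ := hany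
            have : check_left2 t.2.1 = true := hf
            rw [(hIH t ht).1, hall t ht] at this
            cases this

theorem check_eq (b : List Int) :
    check_left2 b = pvLosing b ∧ (b ≠ [] → check_left1 b = !pvLosing b) :=
  check_eq_aux b.length b (le_refl _)

-- ----- facts about Source B's precomputed quantities -----

theorem cnt_split_at (l : List Int) (p : Nat) (hp : p < l.length) :
    cntOdd l = cntOdd (l.take p) +
      ((if l.getD p 0 % 2 = 1 then 1 else 0) + cntOdd (l.drop (p + 1))) := by
  have hget : l.getD p 0 = l[p] := by
    rw [List.getD_eq_getElem?_getD, List.getElem?_eq_getElem hp]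
    rfl
  nth_rewrite 1 [← List.take_append_drop p l]
  rw [cntOdd_append, List.drop_eq_getElem_cons hp, cntOdd_cons, hget]

theorem cntOdd_take_le (l : List Int) {m k : Nat} (h : m ≤ k) :
    cntOdd (l.take m) ≤ cntOdd (l.take k) := by
  have : l.take m = (l.take k).take m := by
    rw [List.take_take, Nat.min_eq_left h]
  rw [this]
  simp only [cntOdd]
  exact (List.take_sublist _ _).countP_le

theorem cntOdd_drop_le (l : List Int) {m k : Nat} (h : k ≤ m) :
    cntOdd (l.drop m) ≤ cntOdd (l.drop k) := by
  have : l.drop m = (l.drop k).drop (m - k) := by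
    rw [List.drop_drop]
    congr 1
    omega
  rw [this]
  simp only [cntOdd]
  exact (List.drop_sublist _ _).countP_le

theorem pvFirstOdd_spec : ∀ (l : List Int) (p : Nat), pvFirstOdd l = some p →
    cntOdd (l.take p) = 0 ∧ l.getD p 0 % 2 = 1 ∧ p < l.length := by
  intro l
  induction l with
  | nil => intro p h; cases h
  | cons x t ih =>
    intro p h
    rw [pvFirstOdd] at h
    by_cases hx : x % 2 = 1
    · rw [if_pos hx] at h
      cases h
      exact ⟨rfl, hx, by simp⟩
    · rw [if_neg hx] at h
      cases hq : pvFirstOdd t with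
      | none => rw [hq] at h; cases h
      | some q =>
        rw [hq] at h
        simp only [Option.map_some] at h
        cases h
        obtain ⟨h1, h2, h3⟩ := ih q hq
        refine ⟨?_, h2, by simp; omega⟩
        simp only [List.take_succ_cons, cntOdd_cons, if_neg hx]
        omega

theorem pvFirstOdd_isSome (l : List Int) (h : cntOdd l ≠ 0) :
    ∃ p, pvFirstOdd l = some p := by
  induction l with
  | nil => exact absurd rfl h
  | cons x t ih =>
    rw [pvFirstOdd]
    by_cases hx : x % 2 = 1
    · exact ⟨0, by rw [if_pos hx]⟩
    · have ht : cntOdd t ≠ 0 := by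
        rw [cntOdd_cons, if_neg hx] at h
        simpa using h
      obtain ⟨q, hq⟩ := ih ht
      exact ⟨q + 1, by rw [if_neg hx, hq]; rfl⟩

theorem pvLastOdd_none : ∀ (l : List Int), pvLastOdd l = none → cntOdd l = 0 := by
  intro l
  induction l with
  | nil => intro _; rfl
  | cons x t ih =>
    intro h
    rw [pvLastOdd] at h
    cases hq : pvLastOdd t with
    | some q => rw [hq] at h; cases h
    | none =>
      rw [hq] at h
      by_cases hx : x % 2 = 1
      · rw [if_pos hx] at h; cases h
      · rw [cntOdd_cons, if_neg hx, ih hq]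

theorem pvLastOdd_spec : ∀ (l : List Int) (p : Nat), pvLastOdd l = some p →
    cntOdd (l.drop (p + 1)) = 0 ∧ l.getD p 0 % 2 = 1 ∧ p < l.length := by
  intro l
  induction l with
  | nil => intro p h; cases h
  | cons x t ih =>
    intro p h
    rw [pvLastOdd] at h
    cases hq : pvLastOdd t with
    | some q =>
      rw [hq] at h
      cases h
      obtain ⟨h1, h2, h3⟩ := ih q hq
      exact ⟨h1, h2, by simp; omega⟩
    | none =>
      rw [hq] at h
      by_cases hx : x % 2 = 1
      · rw [if_pos hx] at h
        cases h
        exact ⟨pvLastOdd_none t hq, hx, by simp⟩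
      · rw [if_neg hx] at h; cases h

theorem pvLastOdd_isSome (l : List Int) (h : cntOdd l ≠ 0) :
    ∃ p, pvLastOdd l = some p := by
  cases hq : pvLastOdd l with
  | some q => exact ⟨q, rfl⟩
  | none => exact absurd (pvLastOdd_none l hq) h

theorem cnt_decomp (a : List Int) (j i : Nat) (_h : j + i ≤ a.length) :
    cntOdd a = cntOdd (a.take j) + (cntOdd ((a.drop j).take i) + cntOdd (a.drop (j + i))) := by
  have h1 : a.drop (j + i) = (a.drop j).drop i := by
    rw [List.drop_drop]
  nth_rewrite 1 [← List.take_append_drop j a]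
  nth_rewrite 1 [← List.take_append_drop i (a.drop j)]
  rw [cntOdd_append, cntOdd_append, h1]

theorem left_length (a : List Int) (j i : Nat) (h : j + i ≤ a.length) :
    (a.take j ++ a.drop (j + i)).length = a.length - i := by
  simp only [List.length_append, List.length_take, List.length_drop]
  omega

theorem seg_take_succ (a : List Int) (j i : Nat) (h1 : 1 ≤ i) (h2 : j + i ≤ a.length) :
    cntOdd ((a.drop j).take i) =
      cntOdd ((a.drop j).take (i - 1)) + (if a.getD (j + i - 1) 0 % 2 = 1 then 1 else 0) := by
  have hk : i - 1 < (a.drop j).length := by simp; omega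
  have hgl : j + (i - 1) < a.length := by omega
  have hget : (a.drop j).getD (i - 1) 0 = a.getD (j + i - 1) 0 := by
    rw [List.getD_eq_getElem?_getD, List.getD_eq_getElem?_getD, List.getElem?_drop]
    congr 2
    omega
  have := cnt_split_at ((a.drop j).take i) (i - 1) (by simp; omega)
  rw [List.take_take, Nat.min_eq_left (by omega)] at this
  have hdrop0 : (((a.drop j).take i).drop (i - 1 + 1)).length = 0 := by simp; omega
  have hdropnil : ((a.drop j).take i).drop (i - 1 + 1) = [] := List.length_eq_zero_iff.1 hdrop0
  rw [hdropnil, cntOdd_nil] at this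
  have hgets : ((a.drop j).take i).getD (i - 1) 0 = (a.drop j).getD (i - 1) 0 := by
    rw [List.getD_eq_getElem?_getD, List.getD_eq_getElem?_getD, List.getElem?_take_of_lt (by omega)]
  rw [hgets, hget] at this
  omega

-- ----- the closed form on remainders with zero / one odd element -----

theorem losing_no_odd {l : List Int} (h : cntOdd l = 0) : pvLosing l = decide (l = []) := by
  cases hl : pvLosing l
  · rcases List.eq_nil_or_concat l with h0 | ⟨_, _, h0⟩
    · rw [h0, pvLosing] at hl; simp at hl
    · have : l ≠ [] := by rw [h0]; simp
      simp [this]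
  · rcases losing_true_elim hl with h0 | ⟨U, x, V, hb, hU, hx, hV, _⟩
    · simp [h0]
    · rw [hb, cntOdd_append, cntOdd_cons, if_pos hx] at h
      omega

theorem losing_shape {l : List Int} (h : pvLosing l = true) :
    l = [] ∨ (cntOdd l = 1 ∧ l.length % 2 = 1) := by
  rcases losing_true_elim h with h0 | ⟨U, x, V, hb, hU, hx, hV, hk⟩
  · exact Or.inl h0
  · right
    constructor
    · rw [hb, cntOdd_append, cntOdd_cons, if_pos hx, cntOdd_eq_zero hU, cntOdd_eq_zero hV]
    · rw [hb]
      simp only [List.length_append, List.length_cons]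
      omega

theorem losing_center {l : List Int} {p : Nat} (h1 : cntOdd l = 1)
    (hU : cntOdd (l.take p) = 0) (hx : l.getD p 0 % 2 = 1) (hp : p < l.length) :
    pvLosing l = decide (l.length % 2 = 1 ∧ p = (l.length - 1) / 2) := by
  have hsplit := cnt_split_at l p hp
  rw [hU, if_pos hx] at hsplit
  have hV : cntOdd (l.drop (p + 1)) = 0 := by omega
  have hdecomp : l = l.take p ++ l.getD p 0 :: l.drop (p + 1) := by
    nth_rewrite 1 [← List.take_append_drop p l]
    congr 1
    rw [List.drop_eq_getElem_cons hp]
    congr 1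
    rw [List.getD_eq_getElem?_getD, List.getElem?_eq_getElem hp]
    rfl
  have hlen : l.length = p + (1 + (l.drop (p + 1)).length) := by
    have := congrArg List.length hdecomp
    simp only [List.length_append, List.length_cons, List.length_take] at this
    omega
  conv_lhs => rw [hdecomp]
  rw [losing_struct _ _ _ (cntOdd_zero_even hU) hx (cntOdd_zero_even hV)]
  rw [decide_eq_decide]
  simp only [List.length_take, List.length_drop]
  omega

-- together, the O(1) arithmetic test of Source B decides pvLosing of the remainder:
theorem losing_left_false_even (a : List Int) (j i : Nat)
    (hji : j + i ≤ a.length)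
    (hone : cntOdd (a.take j) + cntOdd (a.drop (j + i)) = 1)
    (hm : (a.length - i) % 2 = 0) :
    pvLosing (a.take j ++ a.drop (j + i)) = false := by
  cases hl : pvLosing (a.take j ++ a.drop (j + i))
  · rfl
  · rcases losing_shape hl with h0 | ⟨_, h2⟩
    · have h4 : cntOdd (a.take j ++ a.drop (j + i)) = 0 := by rw [h0]; rfl
      rw [cntOdd_append] at h4
      omega
    · rw [left_length a j i hji] at h2
      omega

theorem losing_left_center (a : List Int) (j i fp lp : Nat)
    (hj : j < a.length) (_hi1 : 1 ≤ i) (hji : j + i ≤ a.length)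
    (hone : cntOdd (a.take j) + cntOdd (a.drop (j + i)) = 1)
    (hfp : cntOdd a ≠ 0 → cntOdd (a.take fp) = 0 ∧ a.getD fp 0 % 2 = 1 ∧ fp < a.length)
    (hlp : cntOdd a ≠ 0 → cntOdd (a.drop (lp + 1)) = 0 ∧ a.getD lp 0 % 2 = 1 ∧ lp < a.length)
    (hm : (a.length - i) % 2 = 1) :
    pvLosing (a.take j ++ a.drop (j + i)) =
      decide ((if cntOdd (a.take j) = 1 then fp else lp - i) = (a.length - i - 1) / 2) := by
  have hca : cntOdd a ≠ 0 := by
    have hd := cnt_decomp a j i hji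
    omega
  have hcl : cntOdd (a.take j ++ a.drop (j + i)) = 1 := by
    rw [cntOdd_append]; exact hone
  have hlenl := left_length a j i hji
  have hjlen : (a.take j).length = j := by simp; omega
  by_cases hcj : cntOdd (a.take j) = 1
  · -- the surviving odd element is the first odd of a, at index fp of the remainder
    obtain ⟨hfp0, hfpodd, hfplt⟩ := hfp hca
    have hfpj : fp < j := by
      by_contra hge
      have := cntOdd_take_le a (show j ≤ fp by omega)
      omega
    have hU : cntOdd ((a.take j ++ a.drop (j + i)).take fp) = 0 := by
      rw [List.take_append, hjlen]
      rw [show fp - j = 0 by omega, List.take_zero, List.append_nil, List.take_take,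
        Nat.min_eq_left (by omega)]
      exact hfp0
    have hxg : (a.take j ++ a.drop (j + i)).getD fp 0 = a.getD fp 0 := by
      rw [List.getD_eq_getElem?_getD, List.getElem?_append_left (by omega),
        List.getElem?_take_of_lt hfpj, ← List.getD_eq_getElem?_getD]
    have hplt : fp < (a.take j ++ a.drop (j + i)).length := by omega
    rw [losing_center hcl hU (by rw [hxg]; exact hfpodd) hplt]
    rw [decide_eq_decide, if_pos hcj, hlenl]
    omega
  · -- the surviving odd element is the last odd of a, at index lp - i of the remainder
    obtain ⟨hlp0, hlpodd, hlplt⟩ := hlp hca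
    have hcj0 : cntOdd (a.take j) = 0 := by omega
    have hsuf : cntOdd (a.drop (j + i)) = 1 := by omega
    have hlpge : j + i ≤ lp := by
      by_contra hlt
      have := cntOdd_drop_le a (show lp + 1 ≤ j + i by omega)
      omega
    have hsplit := cnt_split_at (a.drop (j + i)) (lp - (j + i)) (by simp; omega)
    have hgd : (a.drop (j + i)).getD (lp - (j + i)) 0 = a.getD lp 0 := by
      rw [List.getD_eq_getElem?_getD, List.getD_eq_getElem?_getD, List.getElem?_drop]
      congr 2
      omega
    have hdd : (a.drop (j + i)).drop (lp - (j + i) + 1) = a.drop (lp + 1) := by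
      rw [List.drop_drop]
      congr 1
      omega
    rw [hgd, hdd, if_pos hlpodd, hlp0] at hsplit
    have hUmid : cntOdd ((a.drop (j + i)).take (lp - (j + i))) = 0 := by omega
    have hU : cntOdd ((a.take j ++ a.drop (j + i)).take (lp - i)) = 0 := by
      rw [List.take_append, hjlen, List.take_take,
        Nat.min_eq_right (by omega), cntOdd_append, hcj0]
      rw [show lp - i - j = lp - (j + i) by omega]
      omega
    have hxg : (a.take j ++ a.drop (j + i)).getD (lp - i) 0 = a.getD lp 0 := by
      rw [List.getD_eq_getElem?_getD, List.getElem?_append_right (by omega), hjlen,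
        List.getElem?_drop, ← List.getD_eq_getElem?_getD]
      congr 1
      omega
    have hplt : lp - i < (a.take j ++ a.drop (j + i)).length := by omega
    rw [losing_center hcl hU (by rw [hxg]; exact hlpodd) hplt]
    rw [decide_eq_decide, if_neg hcj, hlenl]
    omega

-- ----- the loop invariants of Source B's scan -----

theorem pvInner_eq (a : List Int) (j c cj fp lp : Nat)
    (hc : c = cntOdd a) (hcj : cj = cntOdd (a.take j))
    (hfp : cntOdd a ≠ 0 → cntOdd (a.take fp) = 0 ∧ a.getD fp 0 % 2 = 1 ∧ fp < a.length)
    (hlp : cntOdd a ≠ 0 → cntOdd (a.drop (lp + 1)) = 0 ∧ a.getD lp 0 % 2 = 1 ∧ lp < a.length) :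
    ∀ (k i0 s0 : Nat), 1 ≤ i0 → i0 - 1 + k ≤ a.length - j → j ≤ a.length →
      s0 = cntOdd ((a.drop j).take (i0 - 1)) →
      pvInner a a.length j c cj fp lp (List.range' i0 k) s0 =
        (List.range' i0 k).findSome? (fun i =>
          if ((a.drop j).take i).sum % 2 = 0 ∧
              pvLosing (a.take j ++ a.drop (j + i)) = true then
            some ((j : Int), (j : Int) + (i : Int) - 1)
          else none) := by
  intro k
  induction k with
  | zero => intro i0 s0 _ _ _ _; rfl
  | succ k ih =>
    intro i0 s0 hi0 hbound hjlen hs0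
    have hji : j + i0 ≤ a.length := by omega
    rw [List.range'_succ, List.findSome?_cons]
    have hseq : (if a.getD (j + i0 - 1) 0 % 2 = 1 then s0 + 1 else s0) =
        cntOdd ((a.drop j).take i0) := by
      rw [seg_take_succ a j i0 hi0 hji, hs0]
      split <;> omega
    have hrec : ∀ s', pvInner a a.length j c cj fp lp (List.range' (i0 + 1) k) s' =
        (if s' = cntOdd ((a.drop j).take ((i0 + 1) - 1)) then
          (List.range' (i0 + 1) k).findSome? (fun i =>
            if ((a.drop j).take i).sum % 2 = 0 ∧
                pvLosing (a.take j ++ a.drop (j + i)) = true then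
              some ((j : Int), (j : Int) + (i : Int) - 1)
            else none) else pvInner a a.length j c cj fp lp (List.range' (i0 + 1) k) s') := by
      intro s'
      split
      · next hs' => exact ih (i0 + 1) s' (by omega) (by omega) hjlen hs'
      · rfl
    show (if (if a.getD (j + i0 - 1) 0 % 2 = 1 then s0 + 1 else s0) % 2 = 1 then _ else _) = _
    rw [hseq]
    have hd := cnt_decomp a j i0 hji
    by_cases hpar : cntOdd ((a.drop j).take i0) % 2 = 1
    · rw [if_pos hpar]
      have hsum : ¬ ((a.drop j).take i0).sum % 2 = 0 := by
        have := sum_mod_two ((a.drop j).take i0)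
        omega
      rw [if_neg (fun hco => hsum hco.1), hrec, if_pos (by simp)]
    · rw [if_neg hpar]
      have hsum : ((a.drop j).take i0).sum % 2 = 0 := by
        have h1 := sum_mod_two ((a.drop j).take i0)
        have h2 := Int.emod_two_eq ((a.drop j).take i0).sum
        omega
      by_cases hcs : c = cntOdd ((a.drop j).take i0)
      · rw [if_pos hcs]
        have hone0 : cntOdd (a.take j) + cntOdd (a.drop (j + i0)) = 0 := by omega
        have hcl0 : cntOdd (a.take j ++ a.drop (j + i0)) = 0 := by
          rw [cntOdd_append]; omega
        have hpl := losing_no_odd hcl0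
        by_cases hmz : a.length - i0 = 0
        · have hnil : a.take j ++ a.drop (j + i0) = [] := by
            apply List.length_eq_zero_iff.1
            rw [left_length a j i0 hji]
            exact hmz
          rw [if_pos hmz, if_pos ⟨hsum, by rw [hpl, hnil]; simp⟩]
        · have hnotnil : ¬ (a.take j ++ a.drop (j + i0) = []) := by
            intro h0
            have := congrArg List.length h0
            rw [left_length a j i0 hji] at this
            simp at this
            omega
          rw [if_neg hmz, if_neg (by rw [hpl]; simp [hnotnil]), hrec, if_pos (by simp)]
      · rw [if_neg hcs]
        by_cases hbr : c - cntOdd ((a.drop j).take i0) = 1 ∧ (a.length - i0) % 2 = 1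
        · rw [if_pos hbr]
          have hone : cntOdd (a.take j) + cntOdd (a.drop (j + i0)) = 1 := by omega
          have hctr := losing_left_center a j i0 fp lp (by omega) hi0 hji hone hfp hlp hbr.2
          rw [← hcj] at hctr
          by_cases hpos : (if cj = 1 then fp else lp - i0) = (a.length - i0 - 1) / 2
          · rw [if_pos hpos, if_pos ⟨hsum, by rw [hctr]; simp [hpos]⟩]
          · rw [if_neg hpos, if_neg (fun hco => by
              rw [hctr] at hco
              have := hco.2
              simp at this
              exact hpos this), hrec, if_pos (by simp)]
        · rw [if_neg hbr]
          have hfalse : pvLosing (a.take j ++ a.drop (j + i0)) = false := by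
            by_cases h1 : c - cntOdd ((a.drop j).take i0) = 1
            · have hm : (a.length - i0) % 2 = 0 := by
                rcases Nat.mod_two_eq_zero_or_one (a.length - i0) with h | h
                · exact h
                · exact absurd ⟨h1, h⟩ hbr
              exact losing_left_false_even a j i0 hji (by omega) hm
            · cases hl : pvLosing (a.take j ++ a.drop (j + i0))
              · rfl
              · rcases losing_shape hl with h0 | ⟨h2, _⟩
                · have h4 : cntOdd (a.take j ++ a.drop (j + i0)) = 0 := by rw [h0]; rfl
                  rw [cntOdd_append] at h4
                  omega
                · rw [cntOdd_append] at h2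
                  omega
          rw [if_neg (fun hco => by rw [hfalse] at hco; cases hco.2), hrec,
            if_pos (by simp)]

theorem pvOuter_eq (a : List Int) (c fp lp : Nat)
    (hc : c = cntOdd a)
    (hfp : cntOdd a ≠ 0 → cntOdd (a.take fp) = 0 ∧ a.getD fp 0 % 2 = 1 ∧ fp < a.length)
    (hlp : cntOdd a ≠ 0 → cntOdd (a.drop (lp + 1)) = 0 ∧ a.getD lp 0 % 2 = 1 ∧ lp < a.length) :
    ∀ (k j0 cj : Nat), j0 + k ≤ a.length → cj = cntOdd (a.take j0) →
      pvOuter a a.length c fp lp (List.range' j0 k) cj =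
        (List.range' j0 k).findSome? (fun j =>
          (List.range' 1 (a.length - j)).findSome? (fun i =>
            if ((a.drop j).take i).sum % 2 = 0 ∧
                pvLosing (a.take j ++ a.drop (j + i)) = true then
              some ((j : Int), (j : Int) + (i : Int) - 1)
            else none)) := by
  intro k
  induction k with
  | zero => intro j0 cj _ _; rfl
  | succ k ih =>
    intro j0 cj hbound hcj
    rw [List.range'_succ, List.findSome?_cons]
    have hinner := pvInner_eq a j0 c cj fp lp hc hcj hfp hlp (a.length - j0) 1 0
      (le_refl _) (by omega) (by omega) (by simp [cntOdd_nil])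
    show (match pvInner a a.length j0 c cj fp lp (List.range' 1 (a.length - j0)) 0 with
      | some r => some r
      | none => pvOuter a a.length c fp lp (List.range' (j0 + 1) k)
          (if a.getD j0 0 % 2 = 1 then cj + 1 else cj)) = _
    rw [hinner]
    cases hfs : (List.range' 1 (a.length - j0)).findSome? (fun i =>
        if ((a.drop j0).take i).sum % 2 = 0 ∧
            pvLosing (a.take j0 ++ a.drop (j0 + i)) = true then
          some ((j0 : Int), (j0 : Int) + (i : Int) - 1)
        else none) with
    | some r => rfl
    | none =>
      have hupd : (if a.getD j0 0 % 2 = 1 then cj + 1 else cj) = cntOdd (a.take (j0 + 1)) := by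
        have hsplit := cnt_split_at (a.take (j0 + 1)) j0 (by simp; omega)
        rw [List.take_take, Nat.min_eq_left (by omega)] at hsplit
        have hdnil : ((a.take (j0 + 1)).drop (j0 + 1)).length = 0 := by simp
        rw [List.length_eq_zero_iff.1 hdnil, cntOdd_nil] at hsplit
        have hgets : (a.take (j0 + 1)).getD j0 0 = a.getD j0 0 := by
          rw [List.getD_eq_getElem?_getD, List.getD_eq_getElem?_getD,
            List.getElem?_take_of_lt (by omega)]
        rw [hgets] at hsplit
        rw [hcj]
        split_ifs with hodd
        · rw [if_pos hodd] at hsplit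
          omega
        · rw [if_neg hodd] at hsplit
          omega
      exact ih (j0 + 1) _ (by omega) hupd

theorem alt_eq_spec (a : List Int) :
    initial_move_alt a = (List.range a.length).findSome? (fun j =>
      (List.range' 1 (a.length - j)).findSome? (fun i =>
        if ((a.drop j).take i).sum % 2 = 0 ∧
            pvLosing (a.take j ++ a.drop (j + i)) = true then
          some ((j : Int), (j : Int) + (i : Int) - 1)
        else none)) := by
  rw [initial_move_alt, List.range_eq_range']
  have hfp : cntOdd a ≠ 0 →
      cntOdd (a.take ((pvFirstOdd a).getD 0)) = 0 ∧
        a.getD ((pvFirstOdd a).getD 0) 0 % 2 = 1 ∧ (pvFirstOdd a).getD 0 < a.length := by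
    intro h
    obtain ⟨p, hp⟩ := pvFirstOdd_isSome a h
    rw [hp]
    exact pvFirstOdd_spec a p hp
  have hlp : cntOdd a ≠ 0 →
      cntOdd (a.drop ((pvLastOdd a).getD 0 + 1)) = 0 ∧
        a.getD ((pvLastOdd a).getD 0) 0 % 2 = 1 ∧ (pvLastOdd a).getD 0 < a.length := by
    intro h
    obtain ⟨p, hp⟩ := pvLastOdd_isSome a h
    rw [hp]
    exact pvLastOdd_spec a p hp
  exact pvOuter_eq a _ _ _ rfl hfp hlp a.length 0 0 (by omega) (by simp [cntOdd_nil])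

theorem findSome?_congr {α β : Type} {l : List α} {f g : α → Option β}
    (h : ∀ x ∈ l, f x = g x) : l.findSome? f = l.findSome? g := by
  induction l with
  | nil => rfl
  | cons x t ih =>
    rw [List.findSome?_cons, List.findSome?_cons, h x (by simp), ih (fun y hy => h y (by simp [hy]))]

theorem findSome?_flatMap {α β γ : Type} (l : List α) (f : α → List β) (g : β → Option γ) :
    (l.flatMap f).findSome? g = l.findSome? (fun x => (f x).findSome? g) := by
  induction l with
  | nil => rfl
  | cons x t ih =>
    rw [List.flatMap_cons, List.findSome?_append, ih, List.findSome?_cons]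
    cases (f x).findSome? g <;> simp

theorem findSome?_filterMap {α β γ : Type} (l : List α) (f : α → Option β) (g : β → Option γ) :
    (l.filterMap f).findSome? g = l.findSome? (fun x => (f x).bind g) := by
  induction l with
  | nil => rfl
  | cons x t ih =>
    rw [List.filterMap_cons]
    cases hf : f x with
    | none => simp only [List.findSome?_cons, hf, Option.bind_none]; exact ih
    | some b =>
      simp only [List.findSome?_cons, hf, Option.bind_some]
      cases g b <;> simp [ih]

-- ===== VERDICT (by name: the statement is the Claim_ definition above) =====
theorem initial_move_spec : Claim_equal_initial_move := by
  unfold Claim_equal_initial_move Spec_initial_move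
  intro a _
  rw [alt_eq_spec]
  by_cases h1 : a.length = 1
  · obtain ⟨x, rfl⟩ := List.length_eq_one_iff.1 h1
    rcases Int.emod_two_eq x with h | h <;>
      simp [initial_move, pvLosing, h]
  · have hA : initial_move a = (List.range a.length).findSome? (fun j =>
        (List.range' 1 (a.length - j)).findSome? (fun i =>
          (if ((a.drop j).take i).sum % 2 = 1 then none
           else some ((a.drop j).take i, a.take j ++ a.drop (j + i), i, j)).bind
            (fun t => if check_left2 t.2.1 then
              some ((t.2.2.2 : Int), (t.2.2.2 : Int) + (t.2.2.1 : Int) - 1) else none))) := by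
      rw [initial_move, if_neg h1, pyIterate, findSome?_flatMap]
      exact findSome?_congr (fun j hj => findSome?_filterMap _ _ _)
    rw [hA]
    apply findSome?_congr
    intro j hj
    apply findSome?_congr
    intro i hi
    by_cases hs : ((a.drop j).take i).sum % 2 = 1
    · have hs0 : ¬ ((a.drop j).take i).sum % 2 = 0 := by omega
      rw [if_pos hs, Option.bind_none, if_neg (by exact fun hc => hs0 hc.1)]
    · have hs0 : ((a.drop j).take i).sum % 2 = 0 := by
        have := Int.emod_two_eq ((a.drop j).take i).sum
        omega
      rw [if_neg hs, Option.bind_some]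
      have hcl := (check_eq (a.take j ++ a.drop (j + i))).1
      show (if check_left2 (a.take j ++ a.drop (j + i)) then
          some ((j : Int), (j : Int) + (i : Int) - 1) else none) = _
      rw [hcl]
      by_cases hp : pvLosing (a.take j ++ a.drop (j + i)) = true
      · rw [if_pos hp, if_pos ⟨hs0, hp⟩]
      · rw [if_neg hp, if_neg (by exact fun hc => hp hc.2)]
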